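-- pv_equiv track=rewrite | github.com/fderuiter/proompts | tools/scripts/fix_markdown_issues.py | fix_header_spacing
-- ===== SOURCE A (Python) =====
-- def fix_header_spacing(lines):
--     out = []
--     i = 0
--     while i < len(lines):
--         line = lines[i]
--         if line.lstrip().startswith("#"):
--             if out and out[-1].strip() != "":
--                 out.append("")
--             out.append(line)
--             if i + 1 < len(lines) and lines[i + 1].strip() != "":
--                 out.append("")
--             i += 1
--         else:
--             out.append(line)
--             i += 1
--     return out
-- ===== SOURCE B (Python) =====
-- def fix_header_spacing(lines):
--     # Stateless neighbor-based segmentation: each line is mapped, purely from its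
--     # two neighbors, to the segment it contributes, and the segments are flattened.
--     def is_hdr(s):
--         return s.lstrip().startswith("#")
--
--     def seg(prev, line, nxt):
--         if not is_hdr(line):
--             return [line]
--         before = [""] if prev is not None and not is_hdr(prev) and prev.strip() != "" else []
--         after = [""] if nxt is not None and nxt.strip() != "" else []
--         return before + [line] + after
--
--     prevs = [None] + lines[:-1]
--     nexts = lines[1:] + [None]
--     return [x for p, l, n in zip(prevs, lines, nexts) for x in seg(p, l, n)]
-- ===== Notes on version B (the rewrite author's own statement) =====
-- stated objective: alternative
-- what changed: Replaces A's stateful accumulator loop (which inspects out[-1] and peeks at lines[i+1]) by a stateless map-and-flatten: each line is paired with its two neighbors via zip and mapped to its own segment by a pure local function, then the segments are concatenated.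
import Mathlib
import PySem

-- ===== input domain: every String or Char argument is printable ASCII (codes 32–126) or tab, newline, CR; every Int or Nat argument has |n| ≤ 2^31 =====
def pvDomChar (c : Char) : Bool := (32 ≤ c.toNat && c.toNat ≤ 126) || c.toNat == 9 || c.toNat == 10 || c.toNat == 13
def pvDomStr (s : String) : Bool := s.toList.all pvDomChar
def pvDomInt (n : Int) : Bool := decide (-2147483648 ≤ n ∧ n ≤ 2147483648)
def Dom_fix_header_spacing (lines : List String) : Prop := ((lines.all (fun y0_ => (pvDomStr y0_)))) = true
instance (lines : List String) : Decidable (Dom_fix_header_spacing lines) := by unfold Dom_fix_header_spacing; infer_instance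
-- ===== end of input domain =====

-- B replaces A's stateful accumulator loop (inspecting out[-1] and peeking at lines[i+1]) by a
-- stateless map-and-flatten: each line, paired with its two neighbors by zip, is mapped by a pure
-- local function to its own segment, and the segments are concatenated (objective: alternative).

-- ===== PORT A =====
-- Python 'out and out[-1].strip() != ""'
def lastNonblank (out : List String) : Bool :=
  match out.getLast? with
  | some l => decide (PySem.Str.strip l ≠ "")
  | none => false

def fixA_go : List String → List String → List String
  | [], out => out
  | line :: rest, out =>
    if PySem.Str.startswith (PySem.Str.lstrip line) "#" then
      let out1 := if lastNonblank out then out ++ [""] else out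
      let out2 := out1 ++ [line]
      let out3 := match rest.head? with
        | some next => if PySem.Str.strip next ≠ "" then out2 ++ [""] else out2
        | none => out2
      fixA_go rest out3
    else fixA_go rest (out ++ [line])

def fix_header_spacing (lines : List String) : List String := fixA_go lines []

-- ===== PORT B =====
-- Source B's is_hdr
def pvIsHdr (s : String) : Bool := PySem.Str.startswith (PySem.Str.lstrip s) "#"

-- Source B's seg(prev, line, nxt): the segment contributed by one line, from its neighbors only
def segB (prev : Option String) (line : String) (nxt : Option String) : List String :=
  if pvIsHdr line = false then [line]
  else
    let before : List String := match prev with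
      | some p => if pvIsHdr p = false ∧ PySem.Str.strip p ≠ "" then [""] else []
      | none => []
    let after : List String := match nxt with
      | some m => if PySem.Str.strip m ≠ "" then [""] else []
      | none => []
    before ++ [line] ++ after

def fix_header_spacing_alt (lines : List String) : List String :=
  let prevs : List (Option String) := none :: lines.dropLast.map some
  let nexts : List (Option String) := (lines.drop 1).map some ++ [none]
  (prevs.zip (lines.zip nexts)).flatMap (fun pln => segB pln.1 pln.2.1 pln.2.2)

-- ===== PRECONDITION & SPEC =====
def Spec_fix_header_spacing (lines : List String) (out : List String) : Prop := out = fix_header_spacing_alt lines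
instance (lines : List String) (out : List String) : Decidable (Spec_fix_header_spacing lines out) := by unfold Spec_fix_header_spacing; infer_instance

-- ===== CLAIM =====
def Claim_equal_fix_header_spacing : Prop := ∀ (lines : List String), Dom_fix_header_spacing lines → Spec_fix_header_spacing lines (fix_header_spacing lines)

-- ===== LEMMAS AND PROOFS =====

-- B's flatten of segments, written as a recursion threading the previous line
def segsFrom : Option String → List String → List String
  | _, [] => []
  | p, line :: rest => segB p line rest.head? ++ segsFrom (some line) rest

-- what A's 'out and out[-1].strip() != ""' evaluates to when the last emitted line is `prev`
def prevFlag : Option String → Bool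
  | none => false
  | some p => !pvIsHdr p && decide (PySem.Str.strip p ≠ "")

-- the after-header blank as a function of the next line
def afterList : Option String → List String
  | some m => if PySem.Str.strip m ≠ "" then [""] else []
  | none => []

lemma hdr_strip_ne (s : String) (h : pvIsHdr s = true) : PySem.Str.strip s ≠ "" := by
  simp [pvIsHdr, PySem.Str.strip, PySem.Str.startswith, PySem.Str.lstrip, PySem.Chars.strip,
        PySem.Chars.startswith_iff, PySem.Chars.rstrip] at *
  obtain ⟨t, ht⟩ := h
  exact ⟨'#', by simp [← ht], by decide⟩

lemma lastNonblank_append (out : List String) (x : String) :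
    lastNonblank (out ++ [x]) = decide (PySem.Str.strip x ≠ "") := by
  simp [lastNonblank]

-- B's zip-flatten equals the prev-threading recursion
lemma alt_eq_segsFrom : ∀ (lines : List String) (p : Option String),
    ((p :: lines.dropLast.map some).zip
      (lines.zip ((lines.drop 1).map some ++ [none]))).flatMap
        (fun pln => segB pln.1 pln.2.1 pln.2.2) = segsFrom p lines := by
  intro lines
  induction lines with
  | nil => intro p; simp [segsFrom]
  | cons line rest ih =>
    intro p
    cases rest with
    | nil => simp [segsFrom, segB]
    | cons r rs =>
      have := ih (some line)
      simp only [List.dropLast, List.drop, List.map, List.zip_cons_cons, List.flatMap_cons,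
        List.cons_append, segsFrom] at *
      rw [this]
      rfl

-- the two shapes of one step of A's loop
lemma fixA_cons_header (line : String) (rest out : List String)
    (hh : PySem.Str.startswith (PySem.Str.lstrip line) "#" = true) :
    fixA_go (line :: rest) out =
      fixA_go rest ((if lastNonblank out = true then out ++ [""] else out) ++ [line]
        ++ afterList rest.head?) := by
  conv_lhs => rw [fixA_go]
  simp only [hh, reduceIte]
  cases rest with
  | nil => simp [afterList]
  | cons r rs =>
    by_cases hr : PySem.Str.strip r ≠ "" <;> simp [afterList, List.head?, hr]

lemma fixA_cons_nonheader (line : String) (rest out : List String)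
    (hh : PySem.Str.startswith (PySem.Str.lstrip line) "#" = false) :
    fixA_go (line :: rest) out = fixA_go rest (out ++ [line]) := by
  conv_lhs => rw [fixA_go]
  simp only [hh, Bool.false_eq_true, reduceIte]

lemma segB_header (prev : Option String) (line : String) (nxt : Option String)
    (hh : pvIsHdr line = true) :
    segB prev line nxt = (if prevFlag prev = true then [""] else []) ++ [line]
      ++ afterList nxt := by
  simp only [segB, hh, Bool.true_eq_false, if_false, afterList]
  cases prev with
  | none => simp [prevFlag]
  | some p =>
    cases hp : pvIsHdr p <;> by_cases h2 : PySem.Str.strip p ≠ "" <;> simp [prevFlag, hp, h2]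

lemma segB_nonheader (prev : Option String) (line : String) (nxt : Option String)
    (hh : pvIsHdr line = false) : segB prev line nxt = [line] := by
  simp [segB, hh]

-- main invariant: A's loop, given that out's last line matches prevFlag whenever the next
-- line to process is a header, emits exactly B's segments
lemma fixA_segs : ∀ (rest : List String) (prev : Option String) (out : List String),
    (∀ line, rest.head? = some line → pvIsHdr line = true → lastNonblank out = prevFlag prev) →
    fixA_go rest out = out ++ segsFrom prev rest := by
  intro rest
  induction rest with
  | nil => intro prev out _; simp [fixA_go, segsFrom]
  | cons line rest' ih =>
    intro prev out H
    by_cases hh : pvIsHdr line = true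
    · have hlast : lastNonblank out = prevFlag prev := H line rfl hh
      rw [fixA_cons_header line rest' out hh, hlast, segsFrom,
        segB_header prev line rest'.head? hh]
      cases hq : rest'.head? with
      | none =>
        have : rest' = [] := by cases rest' <;> simp_all
        subst this
        simp only [segsFrom, fixA_go, afterList]
        cases prevFlag prev <;> simp
      | some nx =>
        obtain ⟨rs, rfl⟩ : ∃ rs, rest' = nx :: rs := by cases rest' <;> simp_all
        by_cases hn : PySem.Str.strip nx ≠ ""
        · simp only [afterList, if_pos hn]
          rw [ih (some line) _ (by
            intro l hl hhl
            rw [lastNonblank_append]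
            have h0 : PySem.Str.strip "" = "" := by decide
            simp [prevFlag, hh, h0])]
          cases prevFlag prev <;> simp
        · simp only [afterList, if_neg hn, List.append_nil]
          have hnx : pvIsHdr nx = false := by
            by_contra hc
            exact hn (hdr_strip_ne nx (by simpa using hc))
          rw [ih (some line) _ (by
            intro l hl hhl
            simp only [List.head?, Option.some.injEq] at hl
            subst hl
            exact absurd hhl (by simp [hnx]))]
          cases prevFlag prev <;> simp
    · have hh' : PySem.Str.startswith (PySem.Str.lstrip line) "#" = false := by simpa [pvIsHdr] using hh
      rw [fixA_cons_nonheader line rest' out hh',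
        ih (some line) _ (by
          intro l hl hhl
          rw [lastNonblank_append]
          have hc : PySem.Chars.startswith (PySem.Chars.lstrip line.toList) ['#'] = false := by
            simpa using hh'
          simp [prevFlag, pvIsHdr, hc])]
      rw [segsFrom, segB_nonheader prev line rest'.head? (by simpa [pvIsHdr] using hh')]
      simp

-- ===== VERDICT =====
theorem fix_header_spacing_spec : Claim_equal_fix_header_spacing := by
  intro lines _
  unfold Spec_fix_header_spacing fix_header_spacing fix_header_spacing_alt
  rw [alt_eq_segsFrom lines none]
  rw [fixA_segs lines none [] (by intro l hl _; simp [lastNonblank, prevFlag])]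
  simp
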